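-- pv_equiv track=rewrite | github.com/jianglin7/PLC_transition_sequence_partition | Funct/a1.py | Find_PS
-- ===== SOURCE A (Python) =====
-- def Find_PS(sequence):
--     subsequences = []
--     n = len(sequence)
--     for start in range(n):
--         for end in range(start + 1, n):
--             if sequence[start] == sequence[end]:
--                 subsequence = sequence[start:end + 1]
--                 if subsequence not in subsequences:
--                     subsequences.append(subsequence)
--                 break
--     grouped_subsequences = {}
--     for subsequence in subsequences:
--         start_item = subsequence[0]
--         if start_item in grouped_subsequences:
--             grouped_subsequences[start_item].append(subsequence)
--         else:
--             grouped_subsequences[start_item] = [subsequence]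
--     PS = {}
--     for key, sequences in grouped_subsequences.items():
--         common_elements = set(grouped_subsequences[key][0])
--         for lst in grouped_subsequences[key][1:]:
--             common_elements = common_elements.intersection(set(lst))
--         common_elements_list = list(common_elements)
--         PS[key] = common_elements_list
--     return PS
-- ===== SOURCE B (Python) =====
-- def Find_PS(sequence):
--     # Group indices by value once, then per value intersect the element sets of the
--     # deduplicated consecutive-occurrence slices in one pass (A rescans lists repeatedly).
--     positions = {}
--     i = 0
--     for v in sequence:
--         positions.setdefault(v, []).append(i)
--         i += 1
--     PS = {}
--     for v, idxs in positions.items():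
--         common = None
--         seen = set()
--         for a, b in zip(idxs, idxs[1:]):
--             sub = tuple(sequence[a:b + 1])
--             if sub not in seen:
--                 seen.add(sub)
--                 s = set(sub)
--                 common = s if common is None else common.intersection(s)
--         if common is not None:
--             PS[v] = list(common)
--     return PS
-- ===== Notes on version B (the rewrite author's own statement) =====
-- stated objective: faster
-- what changed: Replaces A's per-start rescan for the next equal element, global list-membership dedup and separate grouping pass with one positions-by-value index built in a single pass and, per value, one loop over consecutive-occurrence pairs that dedups slices with a set of tuples and keeps a running intersection.
import Mathlib
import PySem

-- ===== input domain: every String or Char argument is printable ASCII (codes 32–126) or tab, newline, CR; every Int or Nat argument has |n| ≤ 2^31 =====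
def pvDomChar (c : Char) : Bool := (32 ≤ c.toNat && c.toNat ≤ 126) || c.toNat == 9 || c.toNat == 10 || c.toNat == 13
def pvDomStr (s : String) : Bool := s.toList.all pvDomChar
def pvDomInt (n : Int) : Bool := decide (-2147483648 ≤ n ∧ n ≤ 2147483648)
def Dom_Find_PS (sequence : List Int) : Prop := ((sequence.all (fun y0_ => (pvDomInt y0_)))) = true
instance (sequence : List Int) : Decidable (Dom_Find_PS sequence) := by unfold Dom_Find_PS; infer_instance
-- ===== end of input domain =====

-- B is faster: it indexes the positions of every value in one pass and then, per value,
-- intersects the element sets of the deduplicated consecutive-occurrence slices directly,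
-- instead of A's rescan-for-the-next-equal-element plus list-membership dedup plus a
-- separate grouping pass.
--
-- SHARED PRIMITIVE (used by both ports, like a PySem primitive): both Pythons return
-- `list(<set of ints>)`, whose order is CPython's (3.11) deterministic int-hash table order.
-- The helpers pvHash…pvSetAdd below model that table (open addressing, linear probes 9,
-- perturb shift 5, growth ×4 when fill*5 ≥ mask*3) exactly; each port transliterates its
-- own set(...)/intersection/list(...) calls on top of them.

-- hash(v) for |v| ≤ 2^31 (CPython: hash(-1) = -2)
def pvHash (v : Int) : Int := if v = -1 then -2 else v
-- (size_t)hash truncation and initial index (size_t)hash & mask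
def pvPert (h : Int) : Nat := (h % (2 ^ 64 : Int)).toNat
def pvIdx (h : Int) (mask : Nat) : Nat := pvPert h &&& mask

-- one linear-probe run of set_add_entry: slot i then up to k more consecutive slots;
-- some (some idx) = first empty slot, some none = key already present, none = keep probing
def pvProbeRun (t : List (Option Int)) (v : Int) : Nat → Nat → Option (Option Nat)
  | i, k =>
    match t.getD i none with
    | none => some (some i)
    | some w =>
      if w = v then some none
      else
        match k with
        | 0 => none
        | k' + 1 => pvProbeRun t v (i + 1) k'

-- set_add_entry's probe loop (fuel is never exhausted on tables the model builds)
def pvAddLoop (t : List (Option Int)) (v : Int) : Nat → Nat → Nat → List (Option Int) × Bool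
  | 0, _, _ => (t, false)
  | fuel + 1, i, perturb =>
    let mask := t.length - 1
    let probes := if i + 9 ≤ mask then 9 else 0
    match pvProbeRun t v i probes with
    | some (some idx) => (t.set idx (some v), true)
    | some none => (t, false)
    | none => pvAddLoop t v fuel ((i * 5 + 1 + (perturb >>> 5)) &&& mask) (perturb >>> 5)

-- set_insert_clean's probe run: first empty slot among i .. i+k
def pvCleanRun (t : List (Option Int)) : Nat → Nat → Option Nat
  | i, k =>
    match t.getD i none with
    | none => some i
    | some _ =>
      match k with
      | 0 => none
      | k' + 1 => pvCleanRun t (i + 1) k'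

def pvCleanLoop (t : List (Option Int)) (v : Int) : Nat → Nat → Nat → List (Option Int)
  | 0, _, _ => t
  | fuel + 1, i, perturb =>
    let mask := t.length - 1
    let probes := if i + 9 ≤ mask then 9 else 0
    match pvCleanRun t i probes with
    | some idx => t.set idx (some v)
    | none => pvCleanLoop t v fuel ((i * 5 + 1 + (perturb >>> 5)) &&& mask) (perturb >>> 5)

-- newsize = 8; while newsize <= minused: newsize <<= 1  (fuel 64 covers every reachable size)
def pvNewSize : Nat → Nat → Nat → Nat
  | 0, cur, _ => cur
  | f + 1, cur, minused => if cur ≤ minused then pvNewSize f (cur * 2) minused else cur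

-- set_table_resize: fresh table, re-insert in old table order
def pvResize (entries : List Int) (minused : Nat) : List (Option Int) :=
  entries.foldl
    (fun t v =>
      let h := pvHash v
      pvCleanLoop t v (t.length + 64) (pvIdx h (t.length - 1)) (pvPert h))
    (List.replicate (pvNewSize 64 8 minused) none)

-- a CPython set of ints: (table, used); no deletions occur, so fill = used
def pvEmptySet : List (Option Int) × Nat := (List.replicate 8 none, 0)

def pvSetAdd (s : List (Option Int) × Nat) (v : Int) : List (Option Int) × Nat :=
  let h := pvHash v
  let mask := s.1.length - 1
  let r := pvAddLoop s.1 v (s.1.length + 64) (pvIdx h mask) (pvPert h)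
  if r.2 then
    let used := s.2 + 1
    if used * 5 ≥ mask * 3 then
      (pvResize (r.1.filterMap id) (if used > 50000 then used * 2 else used * 4), used)
    else (r.1, used)
  else s

-- ===== PORT A =====
-- set(lst) (A builds its sets with a foldl over the elements)
def pvSetOfList (xs : List Int) : List (Option Int) × Nat := xs.foldl pvSetAdd pvEmptySet
-- list(s)
def pvSetToList (s : List (Option Int) × Nat) : List Int := s.1.filterMap id
-- set_intersection: iterate the smaller set (the argument on ties), test in the larger, add
def pvSetInter (a b : List (Option Int) × Nat) : List (Option Int) × Nat :=
  let big := if b.2 > a.2 then b else a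
  let small := if b.2 > a.2 then a else b
  (pvSetToList small).foldl (fun r v => if (some v) ∈ big.1 then pvSetAdd r v else r) pvEmptySet

-- inner 'for end in range(start+1, n): if sequence[start] == sequence[end]: …; break'
-- (indices come from range(n), so Nat getD is exact for sequence[start]/sequence[end])
def pvInnerA (sequence : List Int) (subs : List (List Int)) (start : Nat) :
    List Nat → List (List Int)
  | [] => subs
  | e :: rest =>
    if sequence.getD start 0 == sequence.getD e 0 then
      let sub := PySem.List.slice sequence (some (start : Int)) (some ((e : Int) + 1))
      if sub ∈ subs then subs else subs ++ [sub]
    else pvInnerA sequence subs start rest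

-- grouping loop body: grouped_subsequences[start_item] append / create
def pvGroupStepA (d : PySem.Dict Int (List (List Int))) (sub : List Int) :
    PySem.Dict Int (List (List Int)) :=
  let k := PySem.List.pyGetD sub 0 0
  if d.contains k then d.insert k (d.getD k [] ++ [sub]) else d.insert k [sub]

-- PS loop body: common = set(g[0]); for lst in g[1:]: common = common.intersection(set(lst))
def pvPSStepA (ps : PySem.Dict Int (List Int)) (kg : Int × List (List Int)) :
    PySem.Dict Int (List Int) :=
  let c0 := pvSetOfList (kg.2.getD 0 [])
  let c := (kg.2.drop 1).foldl (fun c lst => pvSetInter c (pvSetOfList lst)) c0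
  ps.insert kg.1 (pvSetToList c)

def Find_PS (sequence : List Int) : List (Int × List Int) :=
  let n := sequence.length
  let subsequences :=
    (List.range n).foldl
      (fun subs start => pvInnerA sequence subs start ((List.range n).drop (start + 1))) []
  let grouped := subsequences.foldl pvGroupStepA PySem.Dict.empty
  let PS := grouped.items.foldl pvPSStepA PySem.Dict.empty
  PS.items

-- ===== PORT B =====
-- list(s): walk the table, keep the filled slots
def pvBToList : List (Option Int) → List Int
  | [] => []
  | none :: t => pvBToList t
  | some v :: t => v :: pvBToList t

-- set(sub): add the elements one by one
def pvBSetOf : List Int → (List (Option Int) × Nat) → List (Option Int) × Nat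
  | [], s => s
  | v :: vs, s => pvBSetOf vs (pvSetAdd s v)

-- the add-if-member walk of set_intersection
def pvBFilterAdd (big : List (Option Int)) : List Int → (List (Option Int) × Nat) → List (Option Int) × Nat
  | [], r => r
  | v :: vs, r => pvBFilterAdd big vs (if (some v) ∈ big then pvSetAdd r v else r)

-- common.intersection(s): iterate the smaller operand (the argument on ties)
def pvBInter (a b : List (Option Int) × Nat) : List (Option Int) × Nat :=
  if b.2 > a.2 then pvBFilterAdd b.1 (pvBToList a.1) pvEmptySet
  else pvBFilterAdd a.1 (pvBToList b.1) pvEmptySet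

-- positions: for v in sequence: positions.setdefault(v, []).append(i); i += 1
def pvBIndex : List Int → Nat → PySem.Dict Int (List Nat) → PySem.Dict Int (List Nat)
  | [], _, d => d
  | v :: rest, i, d => pvBIndex rest (i + 1) (d.insert v (d.getD v [] ++ [i]))

-- for a, b in zip(idxs, idxs[1:]): dedup the slice, fold it into the running intersection
def pvBPairs (seq : List Int) : List Nat → Option (List (Option Int) × Nat) → PySem.Set (List Int) → Option (List (Option Int) × Nat)
  | a :: b :: rest, common, seen =>
    let sub := PySem.List.slice seq (some (a : Int)) (some ((b : Int) + 1))
    if PySem.Set.contains seen sub then pvBPairs seq (b :: rest) common seen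
    else
      pvBPairs seq (b :: rest)
        (some (match common with
               | none => pvBSetOf sub pvEmptySet
               | some c => pvBInter c (pvBSetOf sub pvEmptySet)))
        (PySem.Set.add seen sub)
  | _, common, _ => common

-- the PS-building loop over positions.items(); PS's keys are fresh, so its items are
-- exactly the entries in loop order
def pvBBuild (seq : List Int) : List (Int × List Nat) → List (Int × List Int)
  | [] => []
  | (v, idxs) :: rest =>
    match pvBPairs seq idxs none PySem.Set.empty with
    | none => pvBBuild seq rest
    | some c => (v, pvBToList c.1) :: pvBBuild seq rest

def Find_PS_alt (sequence : List Int) : List (Int × List Int) :=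
  pvBBuild sequence (pvBIndex sequence 0 PySem.Dict.empty).items

-- ===== PRECONDITION & SPEC =====
def Spec_Find_PS (sequence : List Int) (out : List (Int × List Int)) : Prop := out = Find_PS_alt sequence
instance (sequence : List Int) (out : List (Int × List Int)) : Decidable (Spec_Find_PS sequence out) := by unfold Spec_Find_PS; infer_instance

-- ===== CLAIM =====
def Claim_equal_Find_PS : Prop := ∀ (sequence : List Int), Dom_Find_PS sequence → Spec_Find_PS sequence (Find_PS sequence)

-- ===== LEMMAS AND PROOFS =====

-- start value of a slice (both programs group by it)
def pvKeyOf (s : List Int) : Int := PySem.List.pyGetD s 0 0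

-- first index e > i with sequence[e] = sequence[i]
def pvNext (seq : List Int) (i : Nat) : Option Nat :=
  ((List.range seq.length).drop (i + 1)).find? (fun e => seq.getD i 0 == seq.getD e 0)

-- A's outer-loop step, characterised through pvNext
def pvStepA (seq : List Int) (subs : List (List Int)) (i : Nat) : List (List Int) :=
  match pvNext seq i with
  | none => subs
  | some e =>
    let sub := PySem.List.slice seq (some (i : Int)) (some ((e : Int) + 1))
    if sub ∈ subs then subs else subs ++ [sub]

-- the slices A appends, before dedup, in outer-loop order
def pvRaw (seq : List Int) : List (List Int) :=
  (List.range seq.length).filterMap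
    (fun i => (pvNext seq i).map
      (fun (e : Nat) => PySem.List.slice seq (some (i : Int)) (some ((e : Int) + 1))))

-- A's per-group intersection fold
def pvFoldInter (g : List (List Int)) : List (Option Int) × Nat :=
  (g.drop 1).foldl (fun c lst => pvSetInter c (pvSetOfList lst)) (pvSetOfList (g.getD 0 []))

-- first position ≥ i of value v in the list starting at offset i
def pvNextIn : List Int → Nat → Int → Option Nat
  | [], _, _ => none
  | x :: xs, i, v => if v == x then some i else pvNextIn xs (i + 1) v

-- pvRaw restricted to the suffix starting at offset i (l = seq.drop i)
def pvRawOf (seq : List Int) : List Int → Nat → List (List Int)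
  | [], _ => []
  | x :: xs, i =>
    match pvNextIn xs (i + 1) x with
    | some e => PySem.List.slice seq (some (i : Int)) (some ((e : Int) + 1)) :: pvRawOf seq xs (i + 1)
    | none => pvRawOf seq xs (i + 1)

-- positions of value v in l, offset i
def pvOcc : List Int → Nat → Int → List Nat
  | [], _, _ => []
  | x :: xs, i, v => if x = v then i :: pvOcc xs (i + 1) v else pvOcc xs (i + 1) v

-- the slices of consecutive occurrences
def pvPairSlices (seq : List Int) : List Nat → List (List Int)
  | a :: b :: rest =>
    PySem.List.slice seq (some (a : Int)) (some ((b : Int) + 1)) :: pvPairSlices seq (b :: rest)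
  | _ => []

-- values that occur again later (the non-last occurrences, in order)
def pvNL : List Int → List Int
  | [] => []
  | x :: xs => if x ∈ xs then x :: pvNL xs else pvNL xs

-- enumerate(l) from offset i, as (value, index) pairs
def pvEnum : List Int → Nat → List (Int × Nat)
  | [], _ => []
  | x :: xs, i => (x, i) :: pvEnum xs (i + 1)

lemma pvInnerA_spec (seq : List Int) (subs : List (List Int)) (i : Nat) (ends : List Nat) :
    pvInnerA seq subs i ends =
      match ends.find? (fun e => seq.getD i 0 == seq.getD e 0) with
      | none => subs
      | some e =>
        if PySem.List.slice seq (some (i : Int)) (some ((e : Int) + 1)) ∈ subs then subs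
        else subs ++ [PySem.List.slice seq (some (i : Int)) (some ((e : Int) + 1))] := by
  induction ends with
  | nil => simp [pvInnerA]
  | cons e rest ih =>
    by_cases h : seq[i]?.getD 0 = seq[e]?.getD 0
    · simp [pvInnerA, List.find?, h]
    · have hb : (seq[i]?.getD 0 == seq[e]?.getD 0) = false := by simpa using h
      rw [show pvInnerA seq subs i (e :: rest) = pvInnerA seq subs i rest by
        simp [pvInnerA, h], ih]
      simp only [List.find?, List.getD_eq_getElem?_getD, hb]

-- A's dedup loop is Set.add over the raw slices
lemma foldl_stepA (seq : List Int) (l : List Nat) (s : List (List Int)) :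
    l.foldl (pvStepA seq) s =
      (l.filterMap (fun i => (pvNext seq i).map
        (fun (e : Nat) => PySem.List.slice seq (some (i : Int)) (some ((e : Int) + 1))))).foldl
        PySem.Set.add s := by
  induction l generalizing s with
  | nil => rfl
  | cons i t ih =>
    rw [List.foldl_cons, List.filterMap_cons]
    cases hn : pvNext seq i with
    | none => rw [show pvStepA seq s i = s by unfold pvStepA; rw [hn]]; exact ih s
    | some e =>
      simp only [Option.map_some, List.foldl_cons]
      rw [show pvStepA seq s i
          = PySem.Set.add s (PySem.List.slice seq (some (i : Int)) (some ((e : Int) + 1))) by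
        simp [pvStepA, hn, PySem.Set.add_eq_ite]]
      exact ih _

-- generic groupby: a fold of `d[key x] = d.get(key x, []) + [val x]` over L, from the
-- empty dict, has exactly the first-occurrence keys with their filtered payloads
lemma ggb_items {α β : Type} (key : α → Int) (val : α → β) (L : List α) :
    ((L.foldl (fun d x => d.insert (key x) (d.getD (key x) [] ++ [val x]))
        (PySem.Dict.empty : PySem.Dict Int (List β))).items)
      = (PySem.Set.ofList (L.map key)).map
          (fun k => (k, (L.filter (fun x => key x == k)).map val)) := by
  induction L using List.reverseRecOn with
  | nil => rfl
  | append_singleton L x ih =>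
    rw [List.foldl_append, List.foldl_cons, List.foldl_nil]
    set D := L.foldl (fun d x => d.insert (key x) (d.getD (key x) [] ++ [val x]))
      (PySem.Dict.empty : PySem.Dict Int (List β)) with hD
    have hkeys : D.keys = PySem.Set.ofList (L.map key) := by
      rw [show D.keys = D.items.map Prod.fst from rfl, ih, List.map_map]
      rw [show (Prod.fst ∘ fun k : Int => (k, List.map val (List.filter (fun x => key x == k) L)))
          = fun k => k from rfl, List.map_id']
    have hnd : D.keys.Nodup := by
      rw [hkeys]
      exact PySem.Set.nodup_ofList _
    rw [List.map_append, List.map_singleton, PySem.Set.ofList_append_singleton]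
    by_cases hx : key x ∈ L.map key
    · have hc : D.contains (key x) = true := by
        rw [PySem.Dict.contains_eq_decide_mem_keys, hkeys]
        simp [PySem.Set.mem_ofList, hx]
      have hmem : (key x, (L.filter (fun y => key y == key x)).map val) ∈ D.items := by
        rw [ih]
        exact List.mem_map.mpr ⟨key x, by rw [PySem.Set.mem_ofList]; exact hx, rfl⟩
      have hgetD : D.getD (key x) [] = (L.filter (fun y => key y == key x)).map val :=
        PySem.Dict.getD_of_mem_items _ hmem hnd []
      rw [PySem.Set.add_of_mem (by rw [PySem.Set.mem_ofList]; exact hx)]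
      rw [PySem.Dict.items_insert_of_contains _ _ hc, ih, hgetD, List.map_map]
      apply List.map_congr_left
      intro k hk
      by_cases hkx : k = key x
      · subst hkx
        simp [List.filter_append]
      · have hb : (k == key x) = false := by simpa using hkx
        have hb' : (key x == k) = false := by simpa using Ne.symm hkx
        simp only [Function.comp, hb, Bool.false_eq_true, if_false]
        rw [List.filter_append,
          show List.filter (fun y => key y == k) [x] = [] from by simp [hb']]
        simp
    · have hc : D.contains (key x) = false := by
        rw [PySem.Dict.contains_eq_decide_mem_keys, hkeys]
        simp [PySem.Set.mem_ofList, hx]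
      have hgetD : D.getD (key x) [] = [] := PySem.Dict.getD_of_not_contains D [] hc
      rw [PySem.Set.add_of_not_mem (by rw [PySem.Set.mem_ofList]; exact hx)]
      rw [PySem.Dict.items_insert_of_not_contains _ _ hc, ih, hgetD, List.map_append]
      congr 1
      · apply List.map_congr_left
        intro k hk
        have hkx : k ≠ key x := by
          rintro rfl
          exact hx ((PySem.Set.mem_ofList _ _).mp hk)
        have hb' : (key x == k) = false := by simpa using Ne.symm hkx
        rw [List.filter_append,
          show List.filter (fun y => key y == k) [x] = [] from by simp [hb']]
        simp
      · rw [List.map_cons, List.map_nil, List.filter_append,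
          show L.filter (fun y => key y == key x) = [] from
            List.filter_eq_nil_iff.mpr
              (fun y hy hky => hx (List.mem_map.mpr ⟨y, hy, by simpa using hky⟩))]
        simp

-- A's grouping step is the generic step
lemma groupA_eq (L : List (List Int)) (d : PySem.Dict Int (List (List Int))) :
    L.foldl pvGroupStepA d
      = L.foldl (fun d x => d.insert (pvKeyOf x) (d.getD (pvKeyOf x) [] ++ [x])) d := by
  induction L generalizing d with
  | nil => rfl
  | cons x t ih =>
    rw [List.foldl_cons, List.foldl_cons, ih]
    congr 1
    unfold pvGroupStepA pvKeyOf
    cases hc : d.contains (PySem.List.pyGetD x 0 0) with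
    | true => simp [hc]
    | false =>
      rw [if_neg (by simp [hc]),
        PySem.Dict.getD_of_not_contains d ([] : List (List Int)) hc]
      simp

-- B's index pass is the generic groupby over enumerate(sequence)
lemma pvBIndex_foldl (l : List Int) (i : Nat) (d : PySem.Dict Int (List Nat)) :
    pvBIndex l i d
      = (pvEnum l i).foldl (fun d p => d.insert p.1 (d.getD p.1 [] ++ [p.2])) d := by
  induction l generalizing i d with
  | nil => rfl
  | cons x xs ih => simp [pvBIndex, pvEnum, ih]

lemma pvEnum_map_fst (l : List Int) (i : Nat) : (pvEnum l i).map Prod.fst = l := by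
  induction l generalizing i with
  | nil => rfl
  | cons x xs ih => simp [pvEnum, ih]

lemma pvEnum_filter_snd (l : List Int) (i : Nat) (v : Int) :
    ((pvEnum l i).filter (fun p => p.1 == v)).map Prod.snd = pvOcc l i v := by
  induction l generalizing i with
  | nil => rfl
  | cons x xs ih =>
    by_cases h : x = v <;> simp [pvEnum, pvOcc, h, ih]

-- find? over the index suffix is pvNextIn over the value suffix
lemma find?_eq_nextIn (seq : List Int) (v : Int) (j : Nat) :
    ((List.range seq.length).drop j).find? (fun e => v == seq.getD e 0)
      = pvNextIn (seq.drop j) j v := by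
  have main : ∀ (k j : Nat), seq.length - j ≤ k →
      ((List.range seq.length).drop j).find? (fun e => v == seq.getD e 0)
        = pvNextIn (seq.drop j) j v := by
    intro k
    induction k with
    | zero =>
      intro j hj
      have h1 : seq.length ≤ j := by omega
      rw [List.drop_eq_nil_of_le (by simpa using h1), List.drop_eq_nil_of_le h1]
      rfl
    | succ k ih =>
      intro j hj
      by_cases h : j < seq.length
      · have h1 : (List.range seq.length).drop j = j :: (List.range seq.length).drop (j + 1) := by
          rw [List.drop_eq_getElem_cons (by simpa using h)]
          simp
        have h2 : seq.drop j = seq[j] :: seq.drop (j + 1) := List.drop_eq_getElem_cons h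
        have h3 : seq.getD j 0 = seq[j] := by
          rw [List.getD_eq_getElem?_getD, List.getElem?_eq_getElem h]
          rfl
        rw [h1, h2]
        simp only [List.find?, pvNextIn, h3]
        cases hv : (v == seq[j]) with
        | true => simp
        | false => simpa using ih (j + 1) (by omega)
      · have h1 : seq.length ≤ j := by omega
        rw [List.drop_eq_nil_of_le (by simpa using h1), List.drop_eq_nil_of_le h1]
        rfl
  exact main (seq.length - j) j le_rfl

-- the raw-slices pass, suffix by suffix
lemma raw_eq_rawOf (seq : List Int) (m : Nat) :
    ((List.range seq.length).drop m).filterMap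
        (fun i => (pvNext seq i).map
          (fun (e : Nat) => PySem.List.slice seq (some (i : Int)) (some ((e : Int) + 1))))
      = pvRawOf seq (seq.drop m) m := by
  have main : ∀ (k m : Nat), seq.length - m ≤ k →
      ((List.range seq.length).drop m).filterMap
          (fun i => (pvNext seq i).map
            (fun (e : Nat) => PySem.List.slice seq (some (i : Int)) (some ((e : Int) + 1))))
        = pvRawOf seq (seq.drop m) m := by
    intro k
    induction k with
    | zero =>
      intro m hm
      have h1 : seq.length ≤ m := by omega
      rw [List.drop_eq_nil_of_le (by simpa using h1), List.drop_eq_nil_of_le h1]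
      rfl
    | succ k ih =>
      intro m hm
      by_cases h : m < seq.length
      · have h1 : (List.range seq.length).drop m = m :: (List.range seq.length).drop (m + 1) := by
          rw [List.drop_eq_getElem_cons (by simpa using h)]
          simp
        have h2 : seq.drop m = seq[m] :: seq.drop (m + 1) := List.drop_eq_getElem_cons h
        have h3 : seq.getD m 0 = seq[m] := by
          rw [List.getD_eq_getElem?_getD, List.getElem?_eq_getElem h]
          rfl
        have h4 : pvNext seq m = pvNextIn (seq.drop (m + 1)) (m + 1) (seq[m]) := by
          rw [pvNext, ← h3]
          exact find?_eq_nextIn seq (seq.getD m 0) (m + 1)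
        rw [h1, h2, List.filterMap_cons, h4]
        cases hn : pvNextIn (seq.drop (m + 1)) (m + 1) (seq[m]) with
        | none => simp only [Option.map_none, pvRawOf, hn]; exact ih (m + 1) (by omega)
        | some e =>
          simp only [Option.map_some, pvRawOf, hn]
          rw [ih (m + 1) (by omega)]
      · have h1 : seq.length ≤ m := by omega
        rw [List.drop_eq_nil_of_le (by simpa using h1), List.drop_eq_nil_of_le h1]
        rfl
  exact main (seq.length - m) m le_rfl

-- the start value of a consecutive slice
lemma keyOf_slice (seq : List Int) (i e : Nat) (_hi : i < seq.length) (he : i ≤ e) :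
    pvKeyOf (PySem.List.slice seq (some (i : Int)) (some ((e : Int) + 1))) = seq.getD i 0 := by
  have hc : ((e : Int) + 1) = ((e + 1 : Nat) : Int) := by push_cast; ring
  rw [pvKeyOf, hc, PySem.List.slice_natCast, PySem.List.pyGetD_zero]
  rw [List.getD_eq_getElem?_getD, List.getD_eq_getElem?_getD]
  rw [List.getElem?_take_of_lt (by omega), List.getElem?_drop]
  simp

lemma pvNextIn_ge (l : List Int) (i : Nat) (v : Int) (e : Nat)
    (h : pvNextIn l i v = some e) : i ≤ e := by
  induction l generalizing i with
  | nil => simp [pvNextIn] at h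
  | cons x xs ih =>
    by_cases hv : (v == x) = true
    · rw [pvNextIn, if_pos hv] at h
      have := Option.some_inj.mp h
      omega
    · rw [pvNextIn, if_neg hv] at h
      have := ih (i + 1) h
      omega

lemma pvNextIn_isSome (l : List Int) (i : Nat) (v : Int) :
    (pvNextIn l i v).isSome = decide (v ∈ l) := by
  induction l generalizing i with
  | nil => simp [pvNextIn]
  | cons x xs ih =>
    by_cases h : v = x <;> simp [pvNextIn, h, ih]

lemma pvOcc_head? (l : List Int) (i : Nat) (v : Int) :
    (pvOcc l i v).head? = pvNextIn l i v := by
  induction l generalizing i with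
  | nil => rfl
  | cons x xs ih =>
    by_cases h : x = v
    · subst h; simp [pvOcc, pvNextIn]
    · have : (v == x) = false := by simpa using Ne.symm h
      simp [pvOcc, pvNextIn, h, this, ih]

-- per-value slices: the raw slices that start with v are the consecutive-occurrence slices
lemma rawOf_filter (seq : List Int) (v : Int) :
    ∀ (l : List Int) (i : Nat), seq.drop i = l →
      (pvRawOf seq l i).filter (fun s => pvKeyOf s == v) = pvPairSlices seq (pvOcc l i v) := by
  intro l
  induction l with
  | nil => intro i h; rfl
  | cons x xs ih =>
    intro i h
    have hi : i < seq.length := by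
      by_contra hle
      rw [List.drop_eq_nil_of_le (by omega)] at h
      exact List.cons_ne_nil x xs h.symm
    have hxs : seq.drop (i + 1) = xs := by
      rw [← List.tail_drop, h]
      rfl
    have hx : seq.getD i 0 = x := by
      have h0 : seq[i]? = some x := by
        rw [← List.head?_drop, h]
        rfl
      rw [List.getD_eq_getElem?_getD, h0]
      rfl
    cases hn : pvNextIn xs (i + 1) x with
    | none =>
      simp only [pvRawOf, hn]
      by_cases hv : x = v
      · subst hv
        have hocc : pvOcc xs (i + 1) x = [] := by
          have hh := pvOcc_head? xs (i + 1) x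
          rw [hn] at hh
          exact List.head?_eq_none_iff.mp hh
        rw [ih (i + 1) hxs]
        simp only [pvOcc, hocc]
        rfl
      · rw [ih (i + 1) hxs]
        simp only [pvOcc, if_neg hv]
    | some e =>
      have hge : i + 1 ≤ e := pvNextIn_ge xs (i + 1) x e hn
      have hkey : pvKeyOf (PySem.List.slice seq (some (i : Int)) (some ((e : Int) + 1))) = x := by
        rw [keyOf_slice seq i e hi (by omega), hx]
      simp only [pvRawOf, hn, List.filter_cons, hkey]
      by_cases hv : x = v
      · subst hv
        cases hoc : pvOcc xs (i + 1) x with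
        | nil =>
          exfalso
          have hh := pvOcc_head? xs (i + 1) x
          rw [hn, hoc] at hh
          simp at hh
        | cons e' rest' =>
          have he' : e' = e := by
            have hh := pvOcc_head? xs (i + 1) x
            rw [hn, hoc] at hh
            exact Option.some_inj.mp hh
          subst he'
          simp only [beq_self_eq_true, if_pos]
          rw [ih (i + 1) hxs, hoc]
          simp only [pvOcc, hoc]
          rfl
      · have hb : (x == v) = false := by simpa using hv
        simp only [hb, Bool.false_eq_true, ite_false]
        rw [ih (i + 1) hxs]
        simp only [pvOcc, if_neg hv]

-- the raw slices' start values are the non-last occurrences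
lemma rawOf_map (seq : List Int) :
    ∀ (l : List Int) (i : Nat), seq.drop i = l →
      (pvRawOf seq l i).map pvKeyOf = pvNL l := by
  intro l
  induction l with
  | nil => intro i h; rfl
  | cons x xs ih =>
    intro i h
    have hi : i < seq.length := by
      by_contra hle
      rw [List.drop_eq_nil_of_le (by omega)] at h
      exact List.cons_ne_nil x xs h.symm
    have hxs : seq.drop (i + 1) = xs := by
      rw [← List.tail_drop, h]
      rfl
    have hx : seq.getD i 0 = x := by
      have h0 : seq[i]? = some x := by
        rw [← List.head?_drop, h]
        rfl
      rw [List.getD_eq_getElem?_getD, h0]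
      rfl
    cases hn : pvNextIn xs (i + 1) x with
    | none =>
      have hxm : x ∉ xs := by
        have hs := pvNextIn_isSome xs (i + 1) x
        rw [hn] at hs
        simpa using hs.symm
      simp only [pvRawOf, hn, pvNL, if_neg hxm]
      exact ih (i + 1) hxs
    | some e =>
      have hxm : x ∈ xs := by
        have hs := pvNextIn_isSome xs (i + 1) x
        rw [hn] at hs
        simpa using hs.symm
      have hge : i + 1 ≤ e := pvNextIn_ge xs (i + 1) x e hn
      have hkey : pvKeyOf (PySem.List.slice seq (some (i : Int)) (some ((e : Int) + 1))) = x := by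
        rw [keyOf_slice seq i e hi (by omega), hx]
      simp only [pvRawOf, hn, List.map_cons, pvNL, if_pos hxm, hkey]
      rw [ih (i + 1) hxs]

lemma ofList_filter {α : Type} [BEq α] [LawfulBEq α] (l : List α) (p : α → Bool) :
    (PySem.Set.ofList l).filter p = PySem.Set.ofList (l.filter p) := by
  induction l using List.reverseRecOn with
  | nil => rfl
  | append_singleton l x ih =>
    rw [PySem.Set.ofList_append_singleton, List.filter_append]
    by_cases hx : x ∈ l
    · rw [PySem.Set.add_of_mem (by rw [PySem.Set.mem_ofList]; exact hx), ih]
      by_cases hp : p x = true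
      · rw [show List.filter p [x] = [x] by simp [hp], PySem.Set.ofList_append_singleton,
          PySem.Set.add_of_mem
            (by rw [PySem.Set.mem_ofList]; exact List.mem_filter.mpr ⟨hx, hp⟩)]
      · rw [show List.filter p [x] = [] by simp [hp], List.append_nil]
    · rw [PySem.Set.add_of_not_mem (by rw [PySem.Set.mem_ofList]; exact hx),
        List.filter_append, ih]
      by_cases hp : p x = true
      · rw [show List.filter p [x] = [x] by simp [hp], PySem.Set.ofList_append_singleton,
          PySem.Set.add_of_not_mem
            (by rw [PySem.Set.mem_ofList]; exact fun hc => hx (List.mem_of_mem_filter hc))]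
      · rw [show List.filter p [x] = [] by simp [hp], List.append_nil, List.append_nil]

lemma ofList_map_ofList {α β : Type} [BEq α] [LawfulBEq α] [BEq β] [LawfulBEq β]
    (f : α → β) (l : List α) :
    PySem.Set.ofList ((PySem.Set.ofList l).map f) = PySem.Set.ofList (l.map f) := by
  induction l using List.reverseRecOn with
  | nil => rfl
  | append_singleton l x ih =>
    rw [PySem.Set.ofList_append_singleton, List.map_append, List.map_singleton,
      PySem.Set.ofList_append_singleton]
    by_cases hx : x ∈ l
    · rw [PySem.Set.add_of_mem (by rw [PySem.Set.mem_ofList]; exact hx), ih,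
        PySem.Set.add_of_mem
          (by rw [PySem.Set.mem_ofList]; exact List.mem_map.mpr ⟨x, hx, rfl⟩)]
    · rw [PySem.Set.add_of_not_mem (by rw [PySem.Set.mem_ofList]; exact hx), List.map_append,
        List.map_singleton, PySem.Set.ofList_append_singleton, ih]

lemma mem_pvNL (l : List Int) (v : Int) : v ∈ pvNL l ↔ 2 ≤ l.count v := by
  induction l with
  | nil => simp [pvNL]
  | cons x xs ih =>
    by_cases h : x ∈ xs
    · rw [show pvNL (x :: xs) = x :: pvNL xs from by rw [pvNL, if_pos h]]
      by_cases hv : v = x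
      · subst hv
        constructor
        · intro _
          have := List.count_pos_iff.mpr h
          rw [List.count_cons_self]
          omega
        · intro _
          exact List.mem_cons_self
      · have hb : (x == v) = false := by simpa using Ne.symm hv
        simp [List.count_cons, hb, List.mem_cons, hv, ih]
    · rw [show pvNL (x :: xs) = pvNL xs from by rw [pvNL, if_neg h]]
      by_cases hv : v = x
      · subst hv
        have h0 : xs.count v = 0 := List.count_eq_zero.mpr h
        rw [List.count_cons_self]
        constructor
        · intro hc
          have := ih.mp hc
          omega
        · intro hc
          omega
      · have hb : (x == v) = false := by simpa using Ne.symm hv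
        simp [List.count_cons, hb, ih]

lemma ofList_pvNL (l : List Int) :
    PySem.Set.ofList (pvNL l) = (PySem.Set.ofList l).filter (fun v => decide (v ∈ pvNL l)) := by
  have hdis : ∀ (s : PySem.Set Int) (y : Int), s.discard y = s.filter (fun z => z != y) :=
    fun _ _ => rfl
  induction l with
  | nil => rfl
  | cons x xs ih =>
    by_cases h : x ∈ xs
    · rw [show pvNL (x :: xs) = x :: pvNL xs from by rw [pvNL, if_pos h]]
      rw [PySem.Set.ofList_cons, PySem.Set.ofList_cons, hdis, hdis, ih, List.filter_cons,
        if_pos (by simp)]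
      congr 1
      rw [List.filter_filter, List.filter_filter]
      apply List.filter_congr
      intro y hy
      by_cases hyx : y = x
      · subst hyx
        simp
      · simp [hyx, List.mem_cons, Bool.and_comm]
    · rw [show pvNL (x :: xs) = pvNL xs from by rw [pvNL, if_neg h]]
      rw [PySem.Set.ofList_cons, hdis, List.filter_cons]
      have hxn : x ∉ pvNL xs := by
        intro hc
        have h1 := (mem_pvNL xs x).mp hc
        have h0 : xs.count x = 0 := List.count_eq_zero.mpr h
        omega
      rw [if_neg (by simp [hxn]), ih, List.filter_filter]
      apply List.filter_congr
      intro y hy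
      by_cases hyx : y = x
      · subst hyx
        simp [hxn]
      · simp [hyx]

lemma pvOcc_length (l : List Int) (i : Nat) (v : Int) :
    (pvOcc l i v).length = l.count v := by
  induction l generalizing i with
  | nil => rfl
  | cons x xs ih =>
    by_cases h : x = v
    · subst h; simp [pvOcc, ih]
    · have : (x == v) = false := by simpa using h
      simp [pvOcc, h, ih]

lemma pvBSetOf_eq (l : List Int) (s : List (Option Int) × Nat) :
    pvBSetOf l s = l.foldl pvSetAdd s := by
  induction l generalizing s with
  | nil => rfl
  | cons x xs ih => simp [pvBSetOf, List.foldl_cons, ih]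

lemma pvBToList_eq (t : List (Option Int)) : pvBToList t = t.filterMap id := by
  induction t with
  | nil => rfl
  | cons o t ih => cases o <;> simp [pvBToList, ih]

lemma pvBFilterAdd_eq (big : List (Option Int)) (l : List Int) (r : List (Option Int) × Nat) :
    pvBFilterAdd big l r
      = l.foldl (fun r v => if (some v) ∈ big then pvSetAdd r v else r) r := by
  induction l generalizing r with
  | nil => rfl
  | cons v vs ih => simp only [pvBFilterAdd, List.foldl_cons, ih]

lemma pvBInter_eq (a b : List (Option Int) × Nat) : pvBInter a b = pvSetInter a b := by
  by_cases hb : b.2 > a.2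
  · simp only [pvBInter, pvSetInter, if_pos hb, pvBFilterAdd_eq, pvBToList_eq]
    rfl
  · simp only [pvBInter, pvSetInter, if_neg hb, pvBFilterAdd_eq, pvBToList_eq]
    rfl

lemma contains_add_eq (seen : PySem.Set (List Int)) (x y : List Int) :
    PySem.Set.contains (PySem.Set.add seen x) y
      = (PySem.Set.contains seen y || y == x) := by
  rw [Bool.eq_iff_iff]
  simp only [Bool.or_eq_true, beq_iff_eq, PySem.Set.contains_iff, PySem.Set.mem_add]

-- the pair loop with a running intersection processes exactly the new deduped slices
lemma pvBPairs_some (seq : List Int) :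
    ∀ (l : List Nat) (c : List (Option Int) × Nat) (seen : PySem.Set (List Int)),
      pvBPairs seq l (some c) seen
        = some (((PySem.Set.ofList (pvPairSlices seq l)).filter
              (fun s => !(PySem.Set.contains seen s))).foldl
            (fun c s => pvSetInter c (pvSetOfList s)) c) := by
  intro l
  induction l with
  | nil => intro c seen; rfl
  | cons a t ih =>
    intro c seen
    cases t with
    | nil => rfl
    | cons b rest =>
      have hps : pvPairSlices seq (a :: b :: rest)
          = PySem.List.slice seq (some (a : Int)) (some ((b : Int) + 1))
              :: pvPairSlices seq (b :: rest) := rfl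
      have hdis : ∀ (s : PySem.Set (List Int)) (y : List Int),
          s.discard y = s.filter (fun z => z != y) := fun _ _ => rfl
      set sub := PySem.List.slice seq (some (a : Int)) (some ((b : Int) + 1)) with hsub
      rw [hps, PySem.Set.ofList_cons, hdis]
      by_cases hc : PySem.Set.contains seen sub = true
      · rw [show pvBPairs seq (a :: b :: rest) (some c) seen
            = pvBPairs seq (b :: rest) (some c) seen from by
          simp only [pvBPairs]
          rw [if_pos hc]]
        rw [ih c seen]
        have hl : ((sub :: (PySem.Set.ofList (pvPairSlices seq (b :: rest))).filter
              (fun z => z != sub)).filter (fun s => !(PySem.Set.contains seen s)))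
            = (PySem.Set.ofList (pvPairSlices seq (b :: rest))).filter
                (fun s => !(PySem.Set.contains seen s)) := by
          rw [List.filter_cons, if_neg (by rw [hc]; simp), List.filter_filter]
          apply List.filter_congr
          intro y hy
          cases hcy : PySem.Set.contains seen y with
          | true => simp
          | false =>
            have hne : y ≠ sub := by
              intro he
              rw [he, hc] at hcy
              exact Bool.noConfusion hcy
            simp [hne]
        rw [hl]
      · rw [show pvBPairs seq (a :: b :: rest) (some c) seen
            = pvBPairs seq (b :: rest)
                (some (pvBInter c (pvBSetOf sub pvEmptySet))) (PySem.Set.add seen sub) from by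
          simp only [pvBPairs]
          rw [if_neg hc]]
        rw [ih _ _, pvBInter_eq, pvBSetOf_eq]
        have hof : (sub.foldl pvSetAdd pvEmptySet) = pvSetOfList sub := rfl
        rw [hof]
        have hcf : PySem.Set.contains seen sub = false := by simpa using hc
        have hr : ((sub :: (PySem.Set.ofList (pvPairSlices seq (b :: rest))).filter
              (fun z => z != sub)).filter (fun s => !(PySem.Set.contains seen s)))
            = sub :: (PySem.Set.ofList (pvPairSlices seq (b :: rest))).filter
                (fun s => !(PySem.Set.contains (PySem.Set.add seen sub) s)) := by
          rw [List.filter_cons, if_pos (by rw [hcf]; rfl), List.filter_filter]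
          congr 1
          apply List.filter_congr
          intro y hy
          rw [contains_add_eq]
          cases hcy : PySem.Set.contains seen y with
          | true => simp
          | false =>
            by_cases hne : y = sub
            · subst hne
              simp
            · simp [bne]
        rw [hr, List.foldl_cons]

lemma pvBPairs_char (seq : List Int) (l : List Nat) :
    pvBPairs seq l none PySem.Set.empty
      = if 2 ≤ l.length
        then some (pvFoldInter (PySem.Set.ofList (pvPairSlices seq l)))
        else none := by
  cases l with
  | nil => rfl
  | cons a t =>
    cases t with
    | nil => rfl
    | cons b rest =>
      have hdis : ∀ (s : PySem.Set (List Int)) (y : List Int),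
          s.discard y = s.filter (fun z => z != y) := fun _ _ => rfl
      set sub := PySem.List.slice seq (some (a : Int)) (some ((b : Int) + 1)) with hsub
      rw [show pvBPairs seq (a :: b :: rest) none PySem.Set.empty
          = pvBPairs seq (b :: rest) (some (pvBSetOf sub pvEmptySet))
              (PySem.Set.add PySem.Set.empty sub) from rfl]
      rw [pvBPairs_some, pvBSetOf_eq]
      rw [if_pos (by simp only [List.length_cons]; omega)]
      have hof : (sub.foldl pvSetAdd pvEmptySet) = pvSetOfList sub := rfl
      rw [hof]
      have hps : pvPairSlices seq (a :: b :: rest) = sub :: pvPairSlices seq (b :: rest) := rfl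
      rw [hps, PySem.Set.ofList_cons, hdis]
      have hadd : PySem.Set.add (PySem.Set.empty : PySem.Set (List Int)) sub = [sub] :=
        PySem.Set.add_of_not_mem (List.not_mem_nil)
      rw [hadd]
      congr 1
      rw [show pvFoldInter
            (sub :: ((PySem.Set.ofList (pvPairSlices seq (b :: rest))).filter (fun z => z != sub)))
          = (((PySem.Set.ofList (pvPairSlices seq (b :: rest))).filter (fun z => z != sub))).foldl
              (fun c lst => pvSetInter c (pvSetOfList lst)) (pvSetOfList sub) from rfl]
      congr 1
      apply List.filter_congr
      intro y hy
      by_cases hne : y = sub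
      · subst hne
        simp
      · simp [hne]

-- the PS loop over the positions entries keeps the repeated values, in order
lemma pvBBuild_map (seq : List Int) (KS : List Int) :
    pvBBuild seq (KS.map (fun v => (v, pvOcc seq 0 v)))
      = (KS.filter (fun v => decide (v ∈ pvNL seq))).map
          (fun k => (k, pvSetToList (pvFoldInter
            (PySem.Set.ofList (pvPairSlices seq (pvOcc seq 0 k)))))) := by
  induction KS with
  | nil => rfl
  | cons v rest ih =>
    rw [List.map_cons, List.filter_cons]
    by_cases hv : v ∈ pvNL seq
    · have h2 : 2 ≤ (pvOcc seq 0 v).length := by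
        rw [pvOcc_length]
        exact (mem_pvNL seq v).mp hv
      rw [show pvBBuild seq ((v, pvOcc seq 0 v) :: rest.map (fun v => (v, pvOcc seq 0 v)))
          = (v, pvBToList (pvFoldInter
              (PySem.Set.ofList (pvPairSlices seq (pvOcc seq 0 v)))).1)
            :: pvBBuild seq (rest.map (fun v => (v, pvOcc seq 0 v))) from by
        simp only [pvBBuild]
        rw [pvBPairs_char, if_pos h2]]
      rw [if_pos (by simp [hv]), ih]
      rw [pvBToList_eq]
      rfl
    · have h2 : ¬ 2 ≤ (pvOcc seq 0 v).length := by
        rw [pvOcc_length]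
        exact fun hc => hv ((mem_pvNL seq v).mpr hc)
      rw [show pvBBuild seq ((v, pvOcc seq 0 v) :: rest.map (fun v => (v, pvOcc seq 0 v)))
          = pvBBuild seq (rest.map (fun v => (v, pvOcc seq 0 v))) from by
        simp only [pvBBuild]
        rw [pvBPairs_char, if_neg h2]]
      rw [if_neg (by simp [hv]), ih]

lemma pvGroupStepA_keys_nodup (subs : List (List Int)) (d : PySem.Dict Int (List (List Int)))
    (h : d.keys.Nodup) : (subs.foldl pvGroupStepA d).keys.Nodup := by
  induction subs generalizing d with
  | nil => exact h
  | cons sub rest ih =>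
    rw [List.foldl_cons]
    apply ih
    cases hc : d.contains (PySem.List.pyGetD sub 0 0) <;>
      simp [pvGroupStepA, hc] <;>
      exact PySem.Dict.nodup_keys_insert d _ _ h

-- ===== VERDICT =====
theorem Find_PS_spec : Claim_equal_Find_PS := by
  unfold Claim_equal_Find_PS Spec_Find_PS
  intro seq _
  have hfun : (fun subs start => pvInnerA seq subs start ((List.range seq.length).drop (start + 1)))
      = pvStepA seq := by
    funext subs i
    rw [pvInnerA_spec]
    rfl
  set subsA := (List.range seq.length).foldl (pvStepA seq) [] with hsubsA
  have hsubs : subsA = PySem.Set.ofList (pvRaw seq) := by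
    rw [hsubsA, foldl_stepA, PySem.Set.ofList_eq_foldl]
    rfl
  have hA : Find_PS seq =
      ((subsA.foldl pvGroupStepA PySem.Dict.empty).items).map
        (fun kg => (kg.1, pvSetToList (pvFoldInter kg.2))) := by
    show ((List.range seq.length).foldl
        (fun subs start => pvInnerA seq subs start ((List.range seq.length).drop (start + 1))) []
        |>.foldl pvGroupStepA PySem.Dict.empty |>.items.foldl pvPSStepA PySem.Dict.empty).items
      = _
    rw [hfun, ← hsubsA]
    have hstep : pvPSStepA = fun (ps : PySem.Dict Int (List Int)) (kg : Int × List (List Int)) =>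
        ps.insert kg.1 (pvSetToList (pvFoldInter kg.2)) := by
      funext ps kg
      rfl
    rw [hstep]
    rw [PySem.Dict.items_foldl_insert_fresh
      ((subsA.foldl pvGroupStepA PySem.Dict.empty).items)
      (fun kg => kg.1) (fun kg => pvSetToList (pvFoldInter kg.2)) PySem.Dict.empty
      (fun a _ => PySem.Dict.contains_empty a.1)
      (by
        have := pvGroupStepA_keys_nodup subsA PySem.Dict.empty PySem.Dict.nodup_keys_empty
        simpa [PySem.Dict.keys] using this)]
    rfl
  have hraw : pvRaw seq = pvRawOf seq seq 0 := by
    have h := raw_eq_rawOf seq 0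
    rw [List.drop_zero, List.drop_zero] at h
    exact h
  have hgg := ggb_items pvKeyOf id subsA
  simp only [id_eq, List.map_id] at hgg
  have hgi : (subsA.foldl pvGroupStepA PySem.Dict.empty).items
      = (PySem.Set.ofList (subsA.map pvKeyOf)).map
          (fun k => (k, subsA.filter (fun x => pvKeyOf x == k))) := by
    rw [groupA_eq]
    exact hgg
  have hkeys : PySem.Set.ofList (subsA.map pvKeyOf)
      = (PySem.Set.ofList seq).filter (fun v => decide (v ∈ pvNL seq)) := by
    rw [hsubs, ofList_map_ofList, hraw, rawOf_map seq seq 0 (by simp), ofList_pvNL]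
  have hpay : ∀ k, subsA.filter (fun x => pvKeyOf x == k)
      = PySem.Set.ofList (pvPairSlices seq (pvOcc seq 0 k)) := by
    intro k
    rw [hsubs, ofList_filter, hraw, rawOf_filter seq k seq 0 (by simp)]
  have hBidx : (pvBIndex seq 0 PySem.Dict.empty).items
      = (PySem.Set.ofList seq).map (fun v => (v, pvOcc seq 0 v)) := by
    rw [pvBIndex_foldl, ggb_items Prod.fst Prod.snd, pvEnum_map_fst]
    apply List.map_congr_left
    intro v hv
    rw [pvEnum_filter_snd]
  have hB : Find_PS_alt seq
      = ((PySem.Set.ofList seq).filter (fun v => decide (v ∈ pvNL seq))).map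
          (fun k => (k, pvSetToList (pvFoldInter
            (PySem.Set.ofList (pvPairSlices seq (pvOcc seq 0 k)))))) := by
    show pvBBuild seq (pvBIndex seq 0 PySem.Dict.empty).items = _
    rw [hBidx, pvBBuild_map]
  rw [hA, hB, hgi, hkeys, List.map_map]
  apply List.map_congr_left
  intro k hk
  simp only [Function.comp]
  rw [hpay k]
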